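-- pv_equiv track=rewrite | github.com/Tek4to/pythonPyQT | main.py | profile_range_sort
-- ===== SOURCE A (Python) =====
-- def profile_range_sort(sorted_dict):
--     range_sorted_dict = {}
--     out = {}
--     i = 1
--     for k, v in sorted_dict.items():
--         out.setdefault(v, []).append(k)
--     for k, v in out.items():
--         for vv in v:
--             range_sorted_dict[vv] = i
--         i += 1
--     return range_sorted_dict
-- ===== SOURCE B (Python) =====
-- def profile_range_sort(sorted_dict):
--     return {k: r
--             for r, v in enumerate(dict.fromkeys(sorted_dict.values()), 1)
--             for k, vv in sorted_dict.items() if vv == v}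
-- ===== Notes on version B (the rewrite author's own statement) =====
-- stated objective: simpler
-- what changed: Replaced the setdefault-bucket grouping dict plus second nested loop with a mutable counter by a single dict comprehension over enumerate(dict.fromkeys(values), 1) that filters the items per distinct value.
import Mathlib
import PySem

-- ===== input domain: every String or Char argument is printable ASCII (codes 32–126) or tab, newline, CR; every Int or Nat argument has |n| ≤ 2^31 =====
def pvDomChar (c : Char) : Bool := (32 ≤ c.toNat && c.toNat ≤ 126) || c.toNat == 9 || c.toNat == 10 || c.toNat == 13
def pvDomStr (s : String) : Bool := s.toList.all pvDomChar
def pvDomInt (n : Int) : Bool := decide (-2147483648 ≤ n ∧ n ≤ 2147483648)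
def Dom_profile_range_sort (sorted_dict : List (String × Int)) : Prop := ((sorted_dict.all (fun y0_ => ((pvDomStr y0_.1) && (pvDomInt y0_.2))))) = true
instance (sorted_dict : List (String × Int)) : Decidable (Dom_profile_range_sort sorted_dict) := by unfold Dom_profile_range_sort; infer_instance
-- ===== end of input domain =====

-- B replaces A's bucket-grouping dict and second nested loop (with a mutable rank counter)
-- by one comprehension over the enumerated deduplicated values; objective: simpler.

-- ===== PORT A =====
def profile_range_sort (sorted_dict : List (String × Int)) : List (String × Int) :=
  -- out.setdefault(v, []).append(k)
  let out : PySem.Dict Int (List String) :=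
    sorted_dict.foldl (fun d p => d.modify p.2 [] (· ++ [p.1])) PySem.Dict.empty
  -- for k, v in out.items(): for vv in v: range_sorted_dict[vv] = i ; i += 1
  let st : PySem.Dict String Int × Int :=
    out.items.foldl
      (fun st gv => (gv.2.foldl (fun d vv => d.insert vv st.2) st.1, st.2 + 1))
      (PySem.Dict.empty, 1)
  st.1.items

-- ===== PORT B =====
def profile_range_sort_alt (sorted_dict : List (String × Int)) : List (String × Int) :=
  -- {k: r for r, v in enumerate(dict.fromkeys(sorted_dict.values()), 1)
  --       for k, vv in sorted_dict.items() if vv == v}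
  ((PySem.List.enumerate (PySem.List.dedup (sorted_dict.map (·.2))) 1).foldl
      (fun (d : PySem.Dict String Int) rv =>
        sorted_dict.foldl
          (fun d kv => if kv.2 == rv.2 then d.insert kv.1 rv.1 else d) d)
      PySem.Dict.empty).items

-- ===== PRECONDITION & SPEC =====
def Spec_profile_range_sort (sorted_dict : List (String × Int)) (out : List (String × Int)) : Prop := out = profile_range_sort_alt sorted_dict
instance (sorted_dict : List (String × Int)) (out : List (String × Int)) : Decidable (Spec_profile_range_sort sorted_dict out) := by unfold Spec_profile_range_sort; infer_instance

-- ===== CLAIM (what is proved, stated in full; the proofs are below) =====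
def Claim_equal_profile_range_sort : Prop := ∀ (sorted_dict : List (String × Int)), Dom_profile_range_sort sorted_dict → Spec_profile_range_sort sorted_dict (profile_range_sort sorted_dict)

-- ===== LEMMAS AND PROOFS =====

-- A's loop with a mutable rank counter is the fold over the enumerated list.
theorem counter_fold_eq_enumerate {α : Type} (gs : List α)
    (f : PySem.Dict String Int → Int → α → PySem.Dict String Int)
    (d : PySem.Dict String Int) (i : Int) :
    (gs.foldl (fun st gv => (f st.1 st.2 gv, st.2 + 1)) (d, i)).1
    = (PySem.List.enumerate gs i).foldl (fun d rg => f d rg.1 rg.2) d := by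
  induction gs generalizing d i with
  | nil => rfl
  | cons g gs ih =>
      simp [PySem.List.enumerate_cons, ih]

-- B's conditional inner loop inserts exactly the keys whose value is v.
theorem cond_fold_eq_filter (l : List (String × Int)) (v : Int) (r : Int)
    (d : PySem.Dict String Int) :
    l.foldl (fun d kv => if kv.2 == v then d.insert kv.1 r else d) d
    = ((l.filter (fun p => p.2 == v)).map (·.1)).foldl (fun d k => d.insert k r) d := by
  induction l generalizing d with
  | nil => rfl
  | cons kv l ih =>
      simp only [List.foldl_cons, List.filter_cons]
      cases hb : kv.2 == v <;> simp only [Bool.false_eq_true, if_true, if_false, List.map_cons, List.foldl_cons] <;> exact ih _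

-- ===== VERDICT (by name: the statement is the Claim_ definition above) =====
theorem profile_range_sort_spec : Claim_equal_profile_range_sort := by
  intro sd _
  unfold Spec_profile_range_sort profile_range_sort profile_range_sort_alt
  have hnd : (sd.foldl (fun d p => d.modify p.2 [] (· ++ [p.1]))
      (PySem.Dict.empty : PySem.Dict Int (List String))).keys.Nodup := by
    exact PySem.Dict.nodup_keys_foldl_modify_key sd (·.2) [] (fun d p => (· ++ [p.1]))
      PySem.Dict.empty (by simp)
  set G : PySem.Dict Int (List String) :=
    sd.foldl (fun d p => d.modify p.2 [] (· ++ [p.1])) PySem.Dict.empty with hG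
  -- the grouping dict's keys are the distinct values in first-appearance order
  have hkeys : G.keys = PySem.List.dedup (sd.map (·.2)) := by
    rw [hG, PySem.Dict.keys_foldl_modify_key sd (·.2) [] (fun d p => (· ++ [p.1]))]
    simp only [PySem.Dict.keys_empty, PySem.Set.update_nil_left, PySem.List.dedup_eq_ofList]
  -- each group is the list of keys carrying that value, in input order
  have hgetD : ∀ v : Int, G.getD v [] = ((sd.filter (fun p => p.2 == v)).map (·.1)) := by
    intro v
    have hswap : G = (sd.map (fun p => (p.2, p.1))).foldl
        (fun d p => d.modify p.1 [] (· ++ [p.2])) PySem.Dict.empty := by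
      rw [hG, List.foldl_map]
    rw [hswap, PySem.Dict.getD_foldl_modify_append]
    simp [List.filter_map, List.map_map, Function.comp_def]
  have hitems : G.items = (PySem.List.dedup (sd.map (·.2))).map
      (fun v => (v, (sd.filter (fun p => p.2 == v)).map (·.1))) := by
    rw [PySem.Dict.items_eq_map_keys G hnd [], hkeys]
    exact List.map_congr_left (fun v _ => by rw [hgetD v])
  simp only [hitems, List.foldl_map, cond_fold_eq_filter]
  rw [counter_fold_eq_enumerate (PySem.List.dedup (sd.map (·.2)))
    (fun d r y => (sd.filter (fun p => p.2 == y)).foldl (fun x p => x.insert p.1 r) d)]
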